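-- pv_equiv track=rewrite | github.com/Anpolod/poly_001 | analytics/tanking_scanner.py | match_teams_in_question
-- ===== SOURCE A (Python) =====
-- def match_teams_in_question(
--     question: str,
--     aliases: dict[str, str],
-- ) -> list[str]:
--     """Return list of canonical team names found in the market question string.
--
--     Uses substring matching (alias.lower() in question.lower()).
--     Returns at most 2 teams, longest-match-first to avoid partial overlaps
--     (e.g. "lakers" matching before "los angeles lakers").
--     """
--     q = question.lower()
--     # Sort by alias length descending so longer aliases win
--     matched_canonical: list[str] = []
--     seen_canonical: set[str] = set()
--
--     for alias in sorted(aliases.keys(), key=len, reverse=True):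
--         canonical = aliases[alias]
--         if alias in q and canonical not in seen_canonical:
--             matched_canonical.append(canonical)
--             seen_canonical.add(canonical)
--         if len(matched_canonical) == 2:
--             break
--
--     return matched_canonical
-- ===== SOURCE B (Python) =====
-- def match_teams_in_question(question, aliases):
--     """No sorting, no seen-set: two selection passes, each scanning the raw
--     items for the longest still-unused matching alias (first wins on ties)."""
--     q = question.lower()
--     items = list(aliases.items())
--     out = []
--     while len(out) < 2:
--         best = None
--         for a, c in items:
--             if a in q and c not in out and (best is None or len(a) > len(best[0])):
--                 best = (a, c)
--         if best is None:
--             break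
--         out.append(best[1])
--     return out
-- ===== Notes on version B (the rewrite author's own statement) =====
-- stated objective: alternative
-- what changed: A sorts all alias keys by length descending and scans the sorted list with a seen-set dedup and an early break; B does no sorting and keeps no seen-set: it runs up to two selection passes over the raw dict items, each pass picking the longest matching alias (first on ties) whose canonical is not yet in the output.
import Mathlib
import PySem

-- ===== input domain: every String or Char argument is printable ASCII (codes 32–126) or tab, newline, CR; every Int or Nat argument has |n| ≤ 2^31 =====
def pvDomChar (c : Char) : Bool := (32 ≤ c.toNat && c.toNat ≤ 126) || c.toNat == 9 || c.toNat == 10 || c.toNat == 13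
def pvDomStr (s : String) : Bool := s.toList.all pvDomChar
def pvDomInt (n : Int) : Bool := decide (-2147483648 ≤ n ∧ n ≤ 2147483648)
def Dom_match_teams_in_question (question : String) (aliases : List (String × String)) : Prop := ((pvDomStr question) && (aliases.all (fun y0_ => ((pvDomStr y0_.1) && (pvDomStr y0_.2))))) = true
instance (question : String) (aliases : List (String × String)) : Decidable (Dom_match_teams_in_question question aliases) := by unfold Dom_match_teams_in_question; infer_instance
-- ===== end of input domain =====

-- B replaces A's sort + seen-set scan by two selection passes, each picking the longest
-- still-unused matching alias from the raw items; objective: alternative algorithm.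

-- ===== PORT A =====
-- the for-loop with its two-state accumulator (matched, seen) and the 'break' at length 2
def pyLoopA (q : String) (d : PySem.Dict String String) :
    List String → List String → PySem.Set String → List String
  | [], matched, _ => matched
  | a :: rest, matched, seen =>
    -- canonical = aliases[alias]; the key is always present (it comes from aliases.keys())
    let c := (d.get? a).getD ""
    if PySem.Str.isIn a q && !(PySem.Set.contains seen c) then
      let matched' := matched ++ [c]
      let seen' := PySem.Set.add seen c
      if matched'.length == 2 then matched' else pyLoopA q d rest matched' seen'
    else
      if matched.length == 2 then matched else pyLoopA q d rest matched seen

def match_teams_in_question (question : String) (aliases : List (String × String)) : List String :=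
  let q := PySem.Str.lower question
  let d := PySem.Dict.ofList aliases
  pyLoopA q d (PySem.List.sorted d.keys (fun a => PySem.Str.len a) true) [] PySem.Set.empty

-- ===== PORT B =====
-- the inner for-loop: best := the first longest matching alias whose canonical is not in out
def pvPickBest (q : String) (out : List String) :
    List (String × String) → Option (String × String) → Option (String × String)
  | [], best => best
  | p :: rest, best =>
    if PySem.Str.isIn p.1 q && !(out.contains p.2) &&
       (match best with
        | none => true
        | some b => decide (PySem.Str.len b.1 < PySem.Str.len p.1)) then
      pvPickBest q out rest (some p)
    else pvPickBest q out rest best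

-- the 'while len(out) < 2' loop, fuel = 2 - len(out)
def pvSelLoop (q : String) (items : List (String × String)) : Nat → List String → List String
  | 0, out => out
  | n + 1, out =>
    match pvPickBest q out items none with
    | none => out
    | some b => pvSelLoop q items n (out ++ [b.2])

def match_teams_in_question_alt (question : String) (aliases : List (String × String)) : List String :=
  let q := PySem.Str.lower question
  let items := (PySem.Dict.ofList aliases).items
  pvSelLoop q items 2 []

-- ===== PRECONDITION & SPEC =====
def Spec_match_teams_in_question (question : String) (aliases : List (String × String)) (out : List String) : Prop := out = match_teams_in_question_alt question aliases
instance (question : String) (aliases : List (String × String)) (out : List String) : Decidable (Spec_match_teams_in_question question aliases out) := by unfold Spec_match_teams_in_question; infer_instance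

-- ===== CLAIM (what is proved, stated in full; the proofs are below) =====
def Claim_equal_match_teams_in_question : Prop := ∀ (question : String) (aliases : List (String × String)), Dom_match_teams_in_question question aliases → Spec_match_teams_in_question question aliases (match_teams_in_question question aliases)

-- ===== LEMMAS AND PROOFS =====

-- proof-side intermediate: dedup/take-2 scan over a sorted hit list
def pyLoopB : List (String × String) → List String → List String
  | [], out => out
  | p :: rest, out =>
    if !(out.contains p.2) then
      let out' := out ++ [p.2]
      if out'.length == 2 then out' else pyLoopB rest out'
    else pyLoopB rest out

-- insertBy puts x in front when x goes before everything
theorem insertBy_all {α : Type} (b : α → α → Bool) (x : α) (l : List α)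
    (h : ∀ z ∈ l, b x z = true) : PySem.List.insertBy b x l = x :: l := by
  cases l with
  | nil => rfl
  | cons y ys => simp [PySem.List.insertBy, h y (by simp)]

-- filtering commutes with one insertion step, given the "once before, always before" shape
theorem filter_insertBy {α : Type} (p : α → Bool) (b : α → α → Bool) (x : α) (ys : List α)
    (h : ys.Pairwise (fun a c => b x a = true → b x c = true)) :
    (PySem.List.insertBy b x ys).filter p =
      if p x then PySem.List.insertBy b x (ys.filter p) else ys.filter p := by
  induction ys with
  | nil => simp [PySem.List.insertBy]; by_cases hp : p x <;> simp [hp, List.filter]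
  | cons y ys ih =>
    have hpw := (List.pairwise_cons.mp h).1
    have htail := (List.pairwise_cons.mp h).2
    by_cases hb : b x y = true
    · by_cases hp : p x
      · by_cases hpy : p y
        · simp [PySem.List.insertBy, hb, List.filter, hp, hpy]
        · have hfy : List.filter p (y :: ys) = List.filter p ys := by
            simp [List.filter, hpy]
          rw [if_pos hp, hfy,
            insertBy_all b x _ (fun z hz => hpw z (List.mem_of_mem_filter hz) hb)]
          simp [PySem.List.insertBy, hb, List.filter, hp, hpy]
      · simp [PySem.List.insertBy, hb, List.filter, hp]
    · rw [show PySem.List.insertBy b x (y :: ys) = y :: PySem.List.insertBy b x ys by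
        simp [PySem.List.insertBy, hb]]
      by_cases hpy : p y
      · rw [show List.filter p (y :: PySem.List.insertBy b x ys)
              = y :: List.filter p (PySem.List.insertBy b x ys) by simp [List.filter, hpy]]
        rw [ih htail]
        by_cases hp : p x
        · simp [hp, List.filter, hpy, PySem.List.insertBy, hb]
        · simp [hp, List.filter, hpy]
      · rw [show List.filter p (y :: PySem.List.insertBy b x ys)
              = List.filter p (PySem.List.insertBy b x ys) by simp [List.filter, hpy]]
        rw [ih htail]
        by_cases hp : p x <;> simp [hp, List.filter, hpy]

-- mapping a projection commutes with one insertion step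
theorem map_insertBy {α β : Type} (f : α → β) (b : β → β → Bool) (x : α) (ys : List α) :
    (PySem.List.insertBy (fun u v => b (f u) (f v)) x ys).map f =
      PySem.List.insertBy b (f x) (ys.map f) := by
  induction ys with
  | nil => rfl
  | cons y ys ih =>
    by_cases hb : b (f x) (f y) = true <;>
      simp [PySem.List.insertBy, hb, ih]

-- one step of insertion sort, reverse=True
theorem sorted_rev_append_singleton {α κ : Type} [LT κ] [DecidableLT κ]
    (xs : List α) (x : α) (key : α → κ) :
    PySem.List.sorted (xs ++ [x]) key true =
      PySem.List.insertBy (fun a b => decide (key b < key a)) x (PySem.List.sorted xs key true) := by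
  rw [PySem.List.sorted_rev_eq_foldl_insertBy, PySem.List.sorted_rev_eq_foldl_insertBy,
    List.foldl_append]
  rfl

-- stable reverse sort commutes with filter
theorem filter_sorted_rev {α κ : Type} [LinearOrder κ] (p : α → Bool) (key : α → κ)
    (xs : List α) :
    (PySem.List.sorted xs key true).filter p = PySem.List.sorted (xs.filter p) key true := by
  induction xs using List.reverseRecOn with
  | nil => rfl
  | append_singleton xs x ih =>
    rw [sorted_rev_append_singleton, filter_insertBy, List.filter_append]
    · by_cases hp : p x
      · have hfx : List.filter p [x] = [x] := by simp [List.filter, hp]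
        rw [if_pos hp, ih, ← sorted_rev_append_singleton, hfx]
      · have hfx : List.filter p [x] = ([] : List α) := by simp [List.filter, hp]
        rw [if_neg hp, ih, hfx, List.append_nil]
    · exact (PySem.List.sorted_pairwise_rev xs key).imp
        (fun {a c} hac hxa => by
          simp only [decide_eq_true_eq] at *
          exact lt_of_le_of_lt hac hxa)

-- stable reverse sort of a projection's image
theorem map_fst_sorted_rev {α β κ : Type} [LT κ] [DecidableLT κ] (f : α → β) (key : β → κ)
    (xs : List α) :
    PySem.List.sorted (xs.map f) key true =
      (PySem.List.sorted xs (fun x => key (f x)) true).map f := by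
  induction xs using List.reverseRecOn with
  | nil => rfl
  | append_singleton xs x ih =>
    rw [List.map_append, List.map_singleton, sorted_rev_append_singleton, ih,
      sorted_rev_append_singleton]
    exact (map_insertBy f (fun a b => decide (key b < key a)) x _).symm

-- A's fused loop over the sorted keys equals the dedup loop over the filtered sorted items
theorem loopA_eq_loopB (q : String) (d : PySem.Dict String String) (L : List (String × String)) :
    ∀ (m : List String) (seen : PySem.Set String),
    (∀ p ∈ L, d.get? p.1 = some p.2) →
    (∀ c, PySem.Set.contains seen c = m.contains c) →
    m.length < 2 →
    pyLoopA q d (L.map Prod.fst) m seen =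
      pyLoopB (L.filter (fun p => PySem.Str.isIn p.1 q)) m := by
  induction L with
  | nil => intro m seen _ _ _; rfl
  | cons p L ih =>
    intro m seen hL hseen hm
    have hget : (d.get? p.1).getD "" = p.2 := by rw [hL p (by simp)]; rfl
    have hlen : (m.length == 2) = false := by simp; omega
    by_cases hin : PySem.Str.isIn p.1 q = true
    · by_cases hc : m.contains p.2 = true
      · simp only [List.map_cons, pyLoopA, hget, hin, hseen, hc, Bool.not_true,
          Bool.and_false, Bool.false_eq_true, if_neg, if_false, hlen, List.filter, hin,
          pyLoopB, Bool.not_eq_eq_eq_not, Bool.not_true]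
        exact ih m seen (fun r hr => hL r (by simp [hr])) hseen hm
      · have hc' : m.contains p.2 = false := by simpa using hc
        simp only [List.map_cons, pyLoopA, hget, hin, hseen, hc', Bool.not_false,
          Bool.and_true, if_pos, List.filter, pyLoopB, Bool.not_eq_eq_eq_not, Bool.not_false]
        by_cases h2 : ((m ++ [p.2]).length == 2) = true
        · have h1 : m.length = 1 := by simp [List.length_append] at h2; omega
          simp [h2, h1]
        · have h2' : ((m ++ [p.2]).length == 2) = false := by simpa using h2
          simp only [h2', Bool.false_eq_true, if_neg, if_false]
          refine ih _ _ (fun r hr => hL r (by simp [hr])) ?_ ?_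
          · intro c
            have hns : PySem.Set.contains seen p.2 = false := (hseen p.2).trans hc'
            simp only [PySem.Set.contains, List.contains_eq_mem, decide_eq_false_iff_not] at hns
            have hadd : PySem.Set.add seen p.2 = seen ++ [p.2] := by
              simp [PySem.Set.add, PySem.Set.contains, hns]
            have hs := hseen c
            simp [PySem.Set.contains] at hs ⊢
            simp [hadd, hs]
          · have hne : (m ++ [p.2]).length ≠ 2 := by simpa using h2'
            simp only [List.length_append, List.length_cons, List.length_nil] at hne ⊢
            omega
    · have hin' : PySem.Str.isIn p.1 q = false := by simpa using hin
      simp only [List.map_cons, pyLoopA, hget, hin', Bool.false_and, Bool.false_eq_true,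
        if_neg, if_false, hlen, List.filter, hin']
      exact ih m seen (fun r hr => hL r (by simp [hr])) hseen hm

-- the running-maximum step of B's inner loop
def pvStep (b : Option (String × String)) (p : String × String) : Option (String × String) :=
  match b with
  | none => some p
  | some y => if decide (PySem.Str.len y.1 < PySem.Str.len p.1) then some p else some y

-- B's inner loop is the running maximum over the condition-filtered list
theorem pickBest_eq_foldl (q : String) (out : List String) (xs : List (String × String)) :
    ∀ best, pvPickBest q out xs best =
      List.foldl pvStep best
        (xs.filter (fun p => PySem.Str.isIn p.1 q && !(out.contains p.2))) := by
  induction xs with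
  | nil => intro best; rfl
  | cons p rest ih =>
    intro best
    by_cases hc : (PySem.Str.isIn p.1 q && !(out.contains p.2)) = true
    · cases best with
      | none =>
        simp only [pvPickBest, hc, Bool.true_and, List.filter, List.foldl_cons, pvStep]
        exact ih (some p)
      | some y =>
        by_cases hl : decide (PySem.Str.len y.1 < PySem.Str.len p.1) = true
        · simp only [pvPickBest, hc, hl, Bool.and_true, List.filter, List.foldl_cons, pvStep,
            if_pos (of_decide_eq_true hl)]
          exact ih (some p)
        · have hl' : decide (PySem.Str.len y.1 < PySem.Str.len p.1) = false := by simpa using hl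
          simp only [pvPickBest, hc, hl', Bool.and_false, Bool.false_eq_true, if_false,
            List.filter, List.foldl_cons, pvStep, hl']
          simpa using ih (some y)
    · have hc' : (PySem.Str.isIn p.1 q && !(out.contains p.2)) = false := by simpa using hc
      simp only [pvPickBest, hc', Bool.false_and, Bool.false_eq_true, if_false, List.filter, hc']
      exact ih best
  termination_by xs => xs.length

-- the head of a stable length-descending sort is the running maximum
theorem head?_sorted_rev (xs : List (String × String)) :
    (PySem.List.sorted xs (fun p => PySem.Str.len p.1) true).head? =
      List.foldl pvStep none xs := by
  induction xs using List.reverseRecOn with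
  | nil => rfl
  | append_singleton xs x ih =>
    rw [sorted_rev_append_singleton, List.foldl_append, ← ih]
    cases h : PySem.List.sorted xs (fun p => PySem.Str.len p.1) true with
    | nil => simp [PySem.List.insertBy, pvStep]
    | cons y ys =>
      by_cases hb : y.1.length < x.1.length
      · simp [PySem.List.insertBy, hb, pvStep, List.foldl_cons]
      · simp [PySem.List.insertBy, hb, pvStep]

-- B's inner loop = head of the filtered, sorted hit list
theorem pickBest_head (q : String) (out : List String) (items : List (String × String)) :
    pvPickBest q out items none =
      ((PySem.List.sorted (items.filter (fun p => PySem.Str.isIn p.1 q))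
          (fun p => PySem.Str.len p.1) true).filter (fun p => !(out.contains p.2))).head? := by
  rw [pickBest_eq_foldl, filter_sorted_rev, head?_sorted_rev, List.filter_filter]
  congr 1
  apply List.filter_congr
  intro p _
  exact Bool.and_comm _ _

-- skipping an already-collected canonical
theorem loopB_skip (p : String × String) (rest : List (String × String)) (out : List String)
    (h : out.contains p.2 = true) : pyLoopB (p :: rest) out = pyLoopB rest out := by
  have h' : p.2 ∈ out := by simpa using h
  simp [pyLoopB, h']

-- one round of the dedup scan, phrased through the head of the not-yet-collected filter
theorem loopB_sel (S : List (String × String)) (out : List String) (hout : out.length ≤ 1) :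
    pyLoopB S out =
      match (S.filter (fun p => !(out.contains p.2))).head? with
      | none => out
      | some p => if out.length = 1 then out ++ [p.2] else pyLoopB S (out ++ [p.2]) := by
  induction S with
  | nil => rfl
  | cons p rest ih =>
    by_cases hc : out.contains p.2 = true
    · rw [loopB_skip p rest out hc, ih]
      have hm : p.2 ∈ out := by simpa using hc
      have hf : List.filter (fun p => !(out.contains p.2)) (p :: rest)
          = List.filter (fun p => !(out.contains p.2)) rest := by simp [List.filter_cons, hm]
      rw [hf]
      cases h : (List.filter (fun p => !(out.contains p.2)) rest).head? with
      | none => rfl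
      | some p' =>
        simp only []
        by_cases h1 : out.length = 1
        · simp [h1]
        · have hc2 : (out ++ [p'.2]).contains p.2 = true := by
            simp at hc ⊢; exact Or.inl hc
          simp only [h1, if_neg, if_false, loopB_skip p rest _ hc2]
    · have hm : p.2 ∉ out := by simpa using hc
      have hf : List.filter (fun p => !(out.contains p.2)) (p :: rest)
          = p :: List.filter (fun p => !(out.contains p.2)) rest := by
        simp [List.filter_cons, hm]
      rw [hf]
      simp only [List.head?_cons]
      by_cases h1 : out.length = 1
      · have h2 : ((out ++ [p.2]).length == 2) = true := by simp [h1]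
        simp [pyLoopB, hm, h2, h1]
      · have h0 : out.length = 0 := by omega
        have h2 : ((out ++ [p.2]).length == 2) = false := by simp [h0]
        have hc2 : (out ++ [p.2]).contains p.2 = true := by simp
        rw [loopB_skip p rest _ hc2] at *
        simp [pyLoopB, hm, h2, h1]

-- ===== VERDICT (by name: the statement is the Claim_ definition above) =====
theorem match_teams_in_question_spec : Claim_equal_match_teams_in_question := by
  intro question aliases _
  unfold Spec_match_teams_in_question match_teams_in_question match_teams_in_question_alt
  simp only []
  set q := PySem.Str.lower question
  set d := PySem.Dict.ofList aliases with hd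
  have hkeys : d.keys = d.items.map Prod.fst := rfl
  rw [hkeys, map_fst_sorted_rev]
  rw [loopA_eq_loopB q d (PySem.List.sorted d.items (fun x => PySem.Str.len x.1) true) [] PySem.Set.empty
      (fun p hp => PySem.Dict.get?_of_mem_items d
        ((PySem.List.mem_sorted _ _ _ _).mp hp) (hd ▸ PySem.Dict.nodup_keys_ofList aliases))
      (fun c => rfl) (by simp)]
  rw [filter_sorted_rev]
  -- both sides are now about S := sorted (filtered items)
  set S := PySem.List.sorted (d.items.filter (fun p => PySem.Str.isIn p.1 q))
      (fun p => PySem.Str.len p.1) true with hS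
  -- unfold B's two selection rounds and A's two dedup rounds against head? of S-filters
  show pyLoopB S [] = pvSelLoop q d.items 2 []
  rw [loopB_sel S [] (by simp)]
  simp only [pvSelLoop, pickBest_head q [] d.items, ← hS]
  have hfe : S.filter (fun p => !(([] : List String).contains p.2)) = S := by
    simp [List.filter]
  rw [hfe]
  cases h1 : S.head? with
  | none => rfl
  | some p =>
    simp only [List.length_nil, if_neg, Nat.zero_ne_one, if_false, List.nil_append]
    rw [loopB_sel S [p.2] (by simp)]
    simp only [pvSelLoop, pickBest_head q [p.2] d.items, ← hS]
    cases h2 : (S.filter (fun r => !(([p.2] : List String).contains r.2))).head? with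
    | none => rfl
    | some p2 => simp [pvSelLoop]
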